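-- pv_equiv track=rewrite | github.com/Arsen1302/Code-copy-detector | TestData/solutions/problem_1680_5.py | solution_1680_5
-- ===== SOURCE A (Python) =====
-- from typing import List
--
-- def solution_1680_5(nums1: List[int], nums2: List[int]) -> int:
--
--     res_a = 0
--     res_b = 0
--
--
--     for j in nums2:
--         res_b^=j
--
--     for i in nums1:
--         res_a^=i
--
--     if len(nums2) %2 ==0 :
--         if len(nums1) %2 == 0 :
--             return 0
--         return res_b
--
--     else :
--         if len(nums1) %2 == 0 :
--             return res_a
--         return res_a ^ res_b
-- ===== SOURCE B (Python) =====
-- from typing import List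
--
-- def _xor_reduce(arr: List[int]) -> int:
--     # divide-and-conquer XOR reduction of a list
--     if len(arr) <= 1:
--         return arr[0] if arr else 0
--     mid = len(arr) // 2
--     return _xor_reduce(arr[:mid]) ^ _xor_reduce(arr[mid:])
--
-- def solution_1680_5(nums1: List[int], nums2: List[int]) -> int:
--     # Each element of nums1 contributes len(nums2) times and vice versa, so the
--     # answer is the XOR of this repetition-built multiset, reduced recursively.
--     arr = nums1 * (len(nums2) % 2) + nums2 * (len(nums1) % 2)
--     return _xor_reduce(arr)
-- ===== Notes on version B (the rewrite author's own statement) =====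
-- stated objective: alternative
-- what changed: B has no accumulators and no parity branch: it materialises the effective multiset by list repetition (nums1*(len2%2) + nums2*(len1%2)) and reduces it with a recursive divide-and-conquer XOR, instead of A's two linear XOR scans combined through a 4-way nested length-parity branch.
import Mathlib
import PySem

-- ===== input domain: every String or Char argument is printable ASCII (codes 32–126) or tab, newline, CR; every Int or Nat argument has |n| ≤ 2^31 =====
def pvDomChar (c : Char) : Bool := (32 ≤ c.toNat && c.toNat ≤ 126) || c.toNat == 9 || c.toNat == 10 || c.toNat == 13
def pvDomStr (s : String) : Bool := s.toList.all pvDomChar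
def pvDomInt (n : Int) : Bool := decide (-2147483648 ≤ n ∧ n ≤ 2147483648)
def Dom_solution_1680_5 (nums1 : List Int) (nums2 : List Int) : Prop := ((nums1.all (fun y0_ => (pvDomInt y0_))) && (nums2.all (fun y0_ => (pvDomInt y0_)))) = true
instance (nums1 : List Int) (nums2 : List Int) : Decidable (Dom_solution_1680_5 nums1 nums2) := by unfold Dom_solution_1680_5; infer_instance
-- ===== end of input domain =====

-- ===== PORT A =====
-- B replaces A's two linear XOR accumulators + 4-way parity branch with a repetition-built
-- list (nums1*(len2%2) + nums2*(len1%2)) reduced by recursive divide-and-conquer XOR (alternative).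
def solution_1680_5 (nums1 : List Int) (nums2 : List Int) : Int :=
  let res_b := nums2.foldl (fun r j => PySem.Int.bxor r j) 0
  let res_a := nums1.foldl (fun r i => PySem.Int.bxor r i) 0
  if nums2.length % 2 == 0 then
    if nums1.length % 2 == 0 then 0
    else res_b
  else
    if nums1.length % 2 == 0 then res_a
    else PySem.Int.bxor res_a res_b

-- ===== PORT B =====
-- Python list repetition l * k (k an int; empty for k <= 0)
def pyListMulInt (l : List Int) (k : Int) : List Int :=
  if k ≤ 0 then [] else l ++ pyListMulInt l (k - 1)
termination_by k.toNat
decreasing_by omega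

-- _xor_reduce: divide-and-conquer XOR reduction (arr[:mid] / arr[mid:] via PySem.List.slice)
def xorReduce (arr : List Int) : Int :=
  if _h : arr.length ≤ 1 then
    match arr with
    | [] => 0
    | x :: _ => x
  else
    let mid : Int := PySem.Int.floordiv (arr.length : Int) 2
    PySem.Int.bxor (xorReduce (PySem.List.slice arr none (some mid)))
                   (xorReduce (PySem.List.slice arr (some mid) none))
termination_by arr.length
decreasing_by
  · have hm : PySem.Int.floordiv ((arr.length : Nat) : Int) 2 = ((arr.length / 2 : Nat) : Int) := by
      exact_mod_cast PySem.Int.floordiv_natCast arr.length 2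
    simp only [hm, PySem.List.slice_to_natCast, List.length_take]; omega
  · have hm : PySem.Int.floordiv ((arr.length : Nat) : Int) 2 = ((arr.length / 2 : Nat) : Int) := by
      exact_mod_cast PySem.Int.floordiv_natCast arr.length 2
    simp only [hm, PySem.List.slice_from_natCast, List.length_drop]; omega

def solution_1680_5_alt (nums1 : List Int) (nums2 : List Int) : Int :=
  let arr := pyListMulInt nums1 (PySem.Int.mod (nums2.length : Int) 2) ++
             pyListMulInt nums2 (PySem.Int.mod (nums1.length : Int) 2)
  xorReduce arr

-- ===== PRECONDITION & SPEC =====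
def Spec_solution_1680_5 (nums1 : List Int) (nums2 : List Int) (out : Int) : Prop := out = solution_1680_5_alt nums1 nums2
instance (nums1 : List Int) (nums2 : List Int) (out : Int) : Decidable (Spec_solution_1680_5 nums1 nums2 out) := by unfold Spec_solution_1680_5; infer_instance

-- ===== CLAIM (what is proved, stated in full; the proofs are below) =====
def Claim_equal_solution_1680_5 : Prop := ∀ (nums1 : List Int) (nums2 : List Int), Dom_solution_1680_5 nums1 nums2 → Spec_solution_1680_5 nums1 nums2 (solution_1680_5 nums1 nums2)

-- ===== LEMMAS AND PROOFS =====

theorem pv_bxor_eq_xor (a b : Int) : PySem.Int.bxor a b = Int.xor a b := by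
  cases a <;> cases b <;>
    simp [PySem.Int.bxor, Int.xor, Int.negSucc_eq] <;> omega

theorem pv_bxor_assoc (a b c : Int) :
    PySem.Int.bxor (PySem.Int.bxor a b) c = PySem.Int.bxor a (PySem.Int.bxor b c) := by
  simp only [pv_bxor_eq_xor]
  cases a <;> cases b <;> cases c <;> simp [Int.xor, Nat.xor_assoc]

theorem pv_zero_bxor (a : Int) : PySem.Int.bxor 0 a = a := by
  rw [PySem.Int.bxor_comm]; simp

-- the xor-fold factors its initial accumulator out
theorem foldl_bxor_init (l : List Int) (a : Int) :
    l.foldl (fun r x => PySem.Int.bxor r x) a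
      = PySem.Int.bxor a (l.foldl (fun r x => PySem.Int.bxor r x) 0) := by
  induction l generalizing a with
  | nil => simp
  | cons x xs ih =>
    simp only [List.foldl_cons]
    rw [ih (PySem.Int.bxor a x), ih (PySem.Int.bxor 0 x)]
    simp [pv_bxor_assoc, pv_zero_bxor]

-- the xor-fold is an append homomorphism
theorem foldl_bxor_append (s t : List Int) :
    (s ++ t).foldl (fun r x => PySem.Int.bxor r x) 0
      = PySem.Int.bxor (s.foldl (fun r x => PySem.Int.bxor r x) 0)
                       (t.foldl (fun r x => PySem.Int.bxor r x) 0) := by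
  rw [List.foldl_append, foldl_bxor_init]

-- divide-and-conquer XOR equals the left xor-fold
theorem xorReduce_eq (l : List Int) :
    xorReduce l = l.foldl (fun r x => PySem.Int.bxor r x) 0 := by
  have H : ∀ (n : Nat) (l : List Int), l.length ≤ n →
      xorReduce l = l.foldl (fun r x => PySem.Int.bxor r x) 0 := by
    intro n
    induction n with
    | zero =>
      intro l hl
      have : l = [] := List.eq_nil_of_length_eq_zero (Nat.le_zero.mp hl)
      subst this; rw [xorReduce]; simp
    | succ n ih =>
      intro l hl
      rw [xorReduce]
      by_cases h1 : l.length ≤ 1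
      · simp only [h1, dif_pos]
        match l with
        | [] => simp
        | [x] => simp [pv_zero_bxor]
        | _ :: _ :: _ => simp at h1
      · simp only [h1, dif_neg, not_false_iff]
        have hm : PySem.Int.floordiv ((l.length : Nat) : Int) 2 = ((l.length / 2 : Nat) : Int) := by
          exact_mod_cast PySem.Int.floordiv_natCast l.length 2
        rw [hm, PySem.List.slice_to_natCast, PySem.List.slice_from_natCast,
            ih _ (by simp [List.length_take]; omega),
            ih _ (by simp [List.length_drop]; omega),
            ← foldl_bxor_append, List.take_append_drop]
  exact H l.length l le_rfl

-- Python list repetition by 0 and by 1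
theorem pyListMulInt_zero (l : List Int) : pyListMulInt l 0 = [] := by
  rw [pyListMulInt]; simp

theorem pyListMulInt_one (l : List Int) : pyListMulInt l 1 = l := by
  rw [pyListMulInt]; simp [pyListMulInt_zero]

theorem pv_mod_two_natCast (n : Nat) :
    PySem.Int.mod ((n : Nat) : Int) 2 = ((n % 2 : Nat) : Int) := by
  exact_mod_cast PySem.Int.mod_natCast n 2

-- ===== VERDICT (by name: the statement is the Claim_ definition above) =====
theorem solution_1680_5_spec : Claim_equal_solution_1680_5 := by
  intro nums1 nums2 _
  unfold Spec_solution_1680_5 solution_1680_5 solution_1680_5_alt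
  rw [pv_mod_two_natCast, pv_mod_two_natCast, xorReduce_eq, foldl_bxor_append]
  rcases Nat.mod_two_eq_zero_or_one nums1.length with h1 | h1 <;>
    rcases Nat.mod_two_eq_zero_or_one nums2.length with h2 | h2 <;>
    simp [h1, h2, pyListMulInt_zero, pyListMulInt_one, pv_zero_bxor]
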